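-- pv_equiv track=rewrite | github.com/yeiin/algorithm | 프로그래머스/2/42626. 더 맵게/더 맵게.py | solution
-- ===== SOURCE A (Python) =====
-- import heapq
--
-- def solution(scoville, K):
--     answer = 0
--
--     heapq.heapify(scoville)
--
--     while True:
--         temp1 = heapq.heappop(scoville)
--         if(temp1 >= K):
--             break
--         else:
--             answer += 1
--             if(len(scoville) == 0):
--                 answer = -1
--                 break
--             temp2 = heapq.heappop(scoville)
--             heapq.heappush(scoville, temp1 + 2*temp2)
--
--     return answer
-- ===== SOURCE B (Python) =====
-- def solution(scoville, K):
--     count = 0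
--     while True:
--         m = min(scoville)
--         if m >= K:
--             return count
--         scoville.remove(m)
--         if not scoville:
--             return -1
--         m2 = min(scoville)
--         scoville.remove(m2)
--         scoville.append(m + 2 * m2)
--         count += 1
-- ===== Notes on version B (the rewrite author's own statement) =====
-- stated objective: simpler
-- what changed: Replaces the binary heap (heapify/heappop/heappush with sift operations) by a plain list processed with repeated min() scans and remove(), so no heap structure is ever built or maintained.
import Mathlib
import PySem

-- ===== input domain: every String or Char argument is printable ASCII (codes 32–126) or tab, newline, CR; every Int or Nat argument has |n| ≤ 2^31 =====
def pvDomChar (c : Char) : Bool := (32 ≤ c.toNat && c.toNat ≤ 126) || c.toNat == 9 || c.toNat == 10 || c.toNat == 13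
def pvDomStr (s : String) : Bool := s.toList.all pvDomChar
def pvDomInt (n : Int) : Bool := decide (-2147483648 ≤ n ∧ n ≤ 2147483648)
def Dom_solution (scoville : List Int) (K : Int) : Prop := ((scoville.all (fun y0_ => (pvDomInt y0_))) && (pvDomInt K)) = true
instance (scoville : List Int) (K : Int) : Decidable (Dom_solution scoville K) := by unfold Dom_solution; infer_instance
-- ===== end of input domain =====

-- B replaces the heapq binary heap of A by repeated min()/remove() scans over a plain list
-- (equal return value; like A, B mutates the passed-in Python list, which this file does not model).

-- ===== PORT A =====
-- Transliteration of CPython's heapq (_siftdown, _siftup, heapify, heappush, heappop)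
-- on a Python list represented as `List Int`; every index access below is in range wherever
-- Python performs it, so `getD`/`set` are exact there.  Each loop carries a structural `fuel`
-- counter as a pure totality guard; the supplied fuel always exceeds the number of iterations
-- (the hole index strictly descends / ascends within the list), so the fuel-0 branch is never
-- reached and the computation is exactly Python's.

-- heapq._siftdown: move the hole at `pos` towards `s`, then place `newitem`.
def pvSiftdownGo (fuel : Nat) (l : List Int) (newitem : Int) (s pos : Nat) : List Int :=
  match fuel with
  | 0 => l.set pos newitem   -- never reached: fuel > pos at every call
  | fuel + 1 =>
    if s < pos then
      let parentpos := (pos - 1) / 2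
      let parent := l.getD parentpos 0
      if newitem < parent then
        pvSiftdownGo fuel (l.set pos parent) newitem s parentpos
      else l.set pos newitem
    else l.set pos newitem

def pvSiftdown (l : List Int) (s pos : Nat) : List Int :=
  pvSiftdownGo (pos + 1) l (l.getD pos 0) s pos

-- heapq._siftup: move the smaller child up into the hole until a leaf, then _siftdown.
def pvSiftupGo (fuel : Nat) (l : List Int) (endpos s : Nat) (newitem : Int) (pos : Nat) : List Int :=
  match fuel with
  | 0 => pvSiftdown (l.set pos newitem) s pos   -- never reached: fuel > endpos - pos at every call
  | fuel + 1 =>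
    if 2 * pos + 1 < endpos then
      let childpos := 2 * pos + 1
      let rightpos := childpos + 1
      let childpos2 :=
        if rightpos < endpos ∧ ¬ (l.getD childpos 0 < l.getD rightpos 0) then rightpos
        else childpos
      pvSiftupGo fuel (l.set pos (l.getD childpos2 0)) endpos s newitem childpos2
    else pvSiftdown (l.set pos newitem) s pos

def pvSiftup (l : List Int) (pos : Nat) : List Int :=
  pvSiftupGo (l.length + 1) l l.length pos (l.getD pos 0) pos

-- heapq.heapify: for i in reversed(range(n//2)): _siftup(x, i)
def pvHeapify (l : List Int) : List Int :=
  ((List.range (l.length / 2)).reverse).foldl (fun h i => pvSiftup h i) l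

-- heapq.heappush: append, then _siftdown(heap, 0, len(heap)-1)
def pvHeappush (l : List Int) (item : Int) : List Int :=
  pvSiftdown (l ++ [item]) 0 l.length

-- heapq.heappop: pop the last element; none = IndexError on the empty list.
def pvHeappop (l : List Int) : Option (Int × List Int) :=
  match l.getLast? with
  | none => none
  | some lastelt =>
    let rest := l.dropLast
    if rest.isEmpty then some (lastelt, [])
    else some (rest.getD 0 0, pvSiftup (rest.set 0 lastelt) 0)

-- the while-loop of `solution` (fuel > initial heap size; every pass shrinks the heap by one)
def pvSolGo (fuel : Nat) (K : Int) (heap : List Int) (answer : Int) : Int :=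
  match fuel with
  | 0 => 0   -- never reached
  | fuel + 1 =>
    match pvHeappop heap with
    | none => 0   -- Python raises IndexError here (only when the initial list is empty; outside Pre_)
    | some (temp1, rest) =>
      if temp1 ≥ K then answer
      else if rest.length = 0 then -1
      else
        match pvHeappop rest with
        | none => 0   -- unreachable: rest ≠ []
        | some (temp2, rest2) =>
          pvSolGo fuel K (pvHeappush rest2 (temp1 + 2 * temp2)) (answer + 1)

def solution (scoville : List Int) (K : Int) : Int :=
  pvSolGo (scoville.length + 1) K (pvHeapify scoville) 0

-- ===== PORT B =====
-- the while-loop of B: min() scan, remove(), append (fuel as above: every pass shrinks the list)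
def pvAltGo (fuel : Nat) (K : Int) (xs : List Int) (count : Int) : Int :=
  match fuel with
  | 0 => 0   -- never reached
  | fuel + 1 =>
    match PySem.List.min? xs (fun x => x) with
    | none => 0   -- Python: min([]) raises ValueError (only when the initial list is empty; outside Pre_)
    | some m =>
      if m ≥ K then count
      else
        match PySem.List.remove? xs m with
        | none => 0   -- unreachable: the minimum is a member
        | some ys =>
          if ys.isEmpty then -1
          else
            match PySem.List.min? ys (fun x => x) with
            | none => 0   -- unreachable: ys ≠ []
            | some m2 =>
              match PySem.List.remove? ys m2 with
              | none => 0   -- unreachable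
              | some zs =>
                pvAltGo fuel K (zs ++ [m + 2 * m2]) (count + 1)

def solution_alt (scoville : List Int) (K : Int) : Int :=
  pvAltGo (scoville.length + 1) K scoville 0

-- ===== PRECONDITION & SPEC =====
-- Pre_ excludes only the empty list, on which Python A raises IndexError (and B ValueError).
def Pre_solution (scoville : List Int) (K : Int) : Prop := scoville ≠ []
instance (scoville : List Int) (K : Int) : Decidable (Pre_solution scoville K) := by
  unfold Pre_solution; infer_instance

def pvWitness_solution : List Int × Int := ([1, 2, 3, 9, 10, 12], 7)

def Spec_solution (scoville : List Int) (K : Int) (out : Int) : Prop := out = solution_alt scoville K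
instance (scoville : List Int) (K : Int) (out : Int) : Decidable (Spec_solution scoville K out) := by
  unfold Spec_solution; infer_instance

-- ===== CLAIM (what is proved, stated in full; the proofs are below) =====
def Claim_equal_solution : Prop := ∀ (scoville : List Int) (K : Int), Dom_solution scoville K → Pre_solution scoville K → Spec_solution scoville K (solution scoville K)

-- ===== LEMMAS AND PROOFS =====

-- length bookkeeping
theorem pvSiftdownGo_length (newitem : Int) (s : Nat) :
    ∀ (fuel : Nat) (l : List Int) (pos : Nat),
      (pvSiftdownGo fuel l newitem s pos).length = l.length := by
  intro fuel
  induction fuel with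
  | zero => intro l pos; simp [pvSiftdownGo]
  | succ n ih =>
    intro l pos
    simp only [pvSiftdownGo]
    split_ifs <;> simp [ih]

theorem pvSiftupGo_length (endpos s : Nat) (newitem : Int) :
    ∀ (fuel : Nat) (l : List Int) (pos : Nat),
      (pvSiftupGo fuel l endpos s newitem pos).length = l.length := by
  intro fuel
  induction fuel with
  | zero => intro l pos; simp [pvSiftupGo, pvSiftdown, pvSiftdownGo_length]
  | succ n ih =>
    intro l pos
    simp only [pvSiftupGo]
    split_ifs <;> simp [ih, pvSiftdown, pvSiftdownGo_length]

theorem pvSiftup_length (l : List Int) (pos : Nat) :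
    (pvSiftup l pos).length = l.length := by
  simp [pvSiftup, pvSiftupGo_length]

theorem pvHeappop_length (l : List Int) (t : Int) (r : List Int)
    (h : pvHeappop l = some (t, r)) : r.length + 1 = l.length := by
  unfold pvHeappop at h
  cases hg : l.getLast? with
  | none => rw [hg] at h; exact absurd h (by simp)
  | some lastelt =>
    rw [hg] at h
    have hne : l ≠ [] := by intro he; subst he; simp at hg
    have hlp : 0 < l.length := List.length_pos_iff.mpr hne
    by_cases hre : l.dropLast.isEmpty
    · simp only [hre, if_pos] at h
      have h0 : l.dropLast.length = 0 := by
        rw [List.isEmpty_iff] at hre; simp [hre]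
      rw [List.length_dropLast] at h0
      cases h; simp; omega
    · simp only [hre, Bool.false_eq_true, if_false] at h
      cases h
      rw [pvSiftup_length, List.length_set, List.length_dropLast]
      omega

theorem pvHeappush_length (l : List Int) (x : Int) :
    (pvHeappush l x).length = l.length + 1 := by
  simp [pvHeappush, pvSiftdown, pvSiftdownGo_length]

theorem pvRemove?_length (xs ys : List Int) (v : Int)
    (h : PySem.List.remove? xs v = some ys) : ys.length + 1 = xs.length := by
  simp only [PySem.List.remove?, Option.map_eq_some_iff] at h
  obtain ⟨k, hk, rfl⟩ := h
  obtain ⟨hlt, -, -⟩ := List.idxOf?_eq_some_iff.mp hk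
  rw [List.length_eraseIdx_of_lt hlt]; omega

-- parent index in the implicit binary heap
def pvPar (c : Nat) : Nat := (c - 1) / 2

theorem pvPar_lt (c : Nat) (h : 0 < c) : pvPar c < c := by
  simp only [pvPar]; omega

theorem pvPar_child (c pos : Nat) (h : pvPar c = pos) (h0 : 0 < c) :
    c = 2 * pos + 1 ∨ c = 2 * pos + 2 := by
  simp only [pvPar] at h; omega

-- `q` lies in the subtree rooted at `s`
def pvInSub (s q : Nat) : Bool :=
  if _h1 : q < s then false
  else if _h2 : q = s then true
  else pvInSub s (pvPar q)
termination_by q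
decreasing_by simp only [pvPar]; omega

theorem pvInSub_self (s : Nat) : pvInSub s s = true := by
  unfold pvInSub; simp

theorem pvInSub_le (s q : Nat) (h : pvInSub s q = true) : s ≤ q := by
  unfold pvInSub at h; split_ifs at h <;> omega

theorem pvInSub_par (s q : Nat) (h : pvInSub s q = true) (hne : q ≠ s) :
    pvInSub s (pvPar q) = true := by
  by_cases h1 : q < s
  · exfalso; unfold pvInSub at h; rw [dif_pos h1] at h; simp at h
  · unfold pvInSub at h; rw [dif_neg h1, dif_neg hne] at h; exact h

theorem pvInSub_child (s pos c : Nat) (h : pvInSub s pos = true) (hc : pvPar c = pos)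
    (hc0 : 0 < c) : pvInSub s c = true := by
  have hs := pvInSub_le s pos h
  have hlt : pos < c := by have := pvPar_lt c hc0; omega
  unfold pvInSub; split_ifs with h1 h2
  · exfalso; omega
  · rfl
  · rw [hc]; exact h

theorem pvInSub_zero (q : Nat) : pvInSub 0 q = true := by
  induction q using Nat.strong_induction_on with
  | _ q IH =>
    unfold pvInSub
    split_ifs with h1 h2
    · exact absurd h1 (by omega)
    · rfl
    · exact IH (pvPar q) (pvPar_lt q (by omega))

-- getD / set bookkeeping
theorem pv_getD_set_self (l : List Int) (i : Nat) (x : Int) (hi : i < l.length) :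
    (l.set i x).getD i 0 = x := by
  rw [List.getD_eq_getElem?_getD, List.getElem?_set_self hi]; rfl

theorem pv_getD_set_ne (l : List Int) (i j : Nat) (x : Int) (hij : i ≠ j) :
    (l.set i x).getD j 0 = l.getD j 0 := by
  rw [List.getD_eq_getElem?_getD, List.getElem?_set_ne hij, ← List.getD_eq_getElem?_getD]

theorem pv_set_getD_self (l : List Int) (i : Nat) (hi : i < l.length) :
    l.set i (l.getD i 0) = l := by
  rw [List.getD_eq_getElem l 0 hi]; exact List.set_getElem_self hi

theorem pv_swap_perm (l : List Int) (i j : Nat) (x : Int) (hi : i < l.length)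
    (hj : j < l.length) (hij : i ≠ j) :
    ((l.set i (l.getD j 0)).set j x).Perm (l.set i x) := by
  rw [List.perm_iff_count]; intro v
  have hj1 : j < (l.set i (l.getD j 0)).length := by simpa using hj
  rw [List.count_set hj1, List.count_set hi, List.count_set hi,
    List.getElem_set_ne hij]
  simp only [show l.getD j 0 = l[j] from List.getD_eq_getElem l 0 hj]
  split_ifs <;> omega

theorem pv_perm_cons_eraseIdx (l : List Int) (i : Nat) (h : i < l.length) :
    l.Perm (l[i] :: l.eraseIdx i) := by
  induction l generalizing i with
  | nil => simp at h
  | cons a t ih =>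
    cases i with
    | zero => simp
    | succ j =>
      simp only [List.length_cons] at h
      have hj : j < t.length := by omega
      simp only [List.eraseIdx_cons_succ, List.getElem_cons_succ]
      exact ((ih j hj).cons a).trans (List.Perm.swap _ _ _)

theorem pv_set_perm (l : List Int) (i : Nat) (x : Int) (h : i < l.length) :
    (l.set i x).Perm (x :: l.eraseIdx i) := by
  induction l generalizing i with
  | nil => simp at h
  | cons a t ih =>
    cases i with
    | zero => simp
    | succ j =>
      simp only [List.set_cons_succ, List.eraseIdx_cons_succ]
      have hj : j < t.length := by simp at h; omega
      exact ((ih j hj).cons a).trans (List.Perm.swap _ _ _)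

-- the heap invariant, relative to a start position
def pvHeapAbove (l : List Int) (s : Nat) : Prop :=
  ∀ c, 0 < c → c < l.length → s ≤ pvPar c → l.getD (pvPar c) 0 ≤ l.getD c 0

def pvIsHeap (l : List Int) : Prop := pvHeapAbove l 0

-- multiset behaviour of the sift operations
theorem pvSiftdownGo_perm (newitem : Int) (s : Nat) :
    ∀ (fuel pos : Nat) (l : List Int), pos < fuel → pos < l.length →
      (pvSiftdownGo fuel l newitem s pos).Perm (l.set pos newitem) := by
  intro fuel
  induction fuel with
  | zero => intro pos l hf hpos; exact absurd hf (Nat.not_lt_zero pos)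
  | succ n ih =>
    intro pos l hf hpos
    simp only [pvSiftdownGo]
    split_ifs with h1 h2
    · refine (ih _ _ (by omega) (by simp; omega)).trans ?_
      exact pv_swap_perm l pos ((pos - 1) / 2) newitem hpos (by omega) (by omega)
    · exact List.Perm.refl _
    · exact List.Perm.refl _

theorem pvSiftupBase_perm (l : List Int) (s pos : Nat) (newitem : Int) (hpos : pos < l.length) :
    (pvSiftdown (l.set pos newitem) s pos).Perm (l.set pos newitem) := by
  unfold pvSiftdown
  rw [pv_getD_set_self _ _ _ hpos]
  have h1 := pvSiftdownGo_perm newitem s (pos + 1) pos (l.set pos newitem)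
    (by omega) (by simpa using hpos)
  rwa [List.set_set] at h1

theorem pvSiftupGo_perm (s : Nat) (newitem : Int) (endpos : Nat) :
    ∀ (fuel : Nat) (l : List Int) (pos : Nat), endpos - pos < fuel → endpos ≤ l.length →
      pos < l.length → (pvSiftupGo fuel l endpos s newitem pos).Perm (l.set pos newitem) := by
  intro fuel
  induction fuel with
  | zero => intro l pos hf hend hpos; exact absurd hf (Nat.not_lt_zero _)
  | succ n ih =>
    intro l pos hf hend hpos
    simp only [pvSiftupGo]
    have main : ∀ k : Nat, pos < k → k < endpos →
        (pvSiftupGo n (l.set pos (l.getD k 0)) endpos s newitem k).Perm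
          (l.set pos newitem) := by
      intro k hk1 hk2
      refine (ih (l.set pos (l.getD k 0)) k (by omega) (by simpa using hend)
        (by simp; omega)).trans ?_
      exact pv_swap_perm l pos k newitem hpos (by omega) (by omega)
    split_ifs with hg hc
    · exact main _ (by omega) hc.1
    · exact main _ (by omega) hg
    · exact pvSiftupBase_perm l s pos newitem hpos

theorem pvSiftup_perm (l : List Int) (pos : Nat) (hpos : pos < l.length) :
    (pvSiftup l pos).Perm l := by
  unfold pvSiftup
  refine (pvSiftupGo_perm pos (l.getD pos 0) l.length (l.length + 1) l pos (by omega) le_rfl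
    hpos).trans ?_
  rw [pv_set_getD_self l pos hpos]

-- the heap invariant through _siftdown
theorem pvSiftdownGo_heapAbove (newitem : Int) (s : Nat) :
    ∀ (fuel pos : Nat) (l : List Int), pos < fuel → pos < l.length → pvInSub s pos = true →
      (∀ c, 0 < c → c < l.length → s ≤ pvPar c → c ≠ pos → pvPar c ≠ pos →
        l.getD (pvPar c) 0 ≤ l.getD c 0) →
      (∀ c, 0 < c → c < l.length → pvPar c = pos → newitem ≤ l.getD c 0) →
      (∀ c, 0 < c → c < l.length → pvPar c = pos → pos ≠ s →
        l.getD (pvPar pos) 0 ≤ l.getD c 0) →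
      pvHeapAbove (pvSiftdownGo fuel l newitem s pos) s := by
  intro fuel
  induction fuel with
  | zero => intro pos l hf; exact absurd hf (Nat.not_lt_zero pos)
  | succ n IH =>
    intro pos l hf hpos hsub hA hB hC
    simp only [pvSiftdownGo]
    split_ifs with h1 h2
    · -- step: the parent value moves down into the hole
      have hppos : pvPar pos = (pos - 1) / 2 := rfl
      have hsub2 : pvInSub s ((pos - 1) / 2) = true := by
        have := pvInSub_par s pos hsub (by omega)
        rwa [hppos] at this
      apply IH ((pos - 1) / 2) _ (by omega)
      · simp only [List.length_set]; omega
      · exact hsub2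
      · -- hA'
        intro c hc0 hclen hspar hcne hcparne
        rw [List.length_set] at hclen
        by_cases hcp : pvPar c = pos
        · have hcgt : pos < c := by have := pvPar_lt c hc0; omega
          rw [pv_getD_set_ne _ _ _ _ (by omega : pos ≠ c), hcp, pv_getD_set_self _ _ _ hpos]
          have := hC c hc0 hclen hcp (by omega : pos ≠ s)
          rwa [hppos] at this
        · have hc_ne : c ≠ pos := by
            intro he; apply hcparne; rw [he]; exact hppos
          rw [pv_getD_set_ne _ _ _ _ (fun he => hcp he.symm),
            pv_getD_set_ne _ _ _ _ (fun he => hc_ne he.symm)]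
          exact hA c hc0 hclen hspar hc_ne hcp
      · -- hB'
        intro c hc0 hclen hcp
        rw [List.length_set] at hclen
        by_cases hce : c = pos
        · subst hce; rw [pv_getD_set_self _ _ _ hpos]; exact le_of_lt h2
        · rw [pv_getD_set_ne _ _ _ _ (fun he => hce he.symm)]
          have hsppos : s ≤ (pos - 1) / 2 := by
            have := pvInSub_le s _ hsub2; omega
          have hedge := hA c hc0 hclen (by rw [hcp]; exact hsppos) hce
            (by rw [hcp]; omega)
          rw [hcp] at hedge
          exact le_trans (le_of_lt h2) hedge
      · -- hC'
        intro c hc0 hclen hcp hps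
        rw [List.length_set] at hclen
        have hp0 : 0 < (pos - 1) / 2 := by
          have := pvInSub_le s _ hsub2; omega
        have hsub3 : pvInSub s (pvPar ((pos - 1) / 2)) = true := pvInSub_par s _ hsub2 hps
        have hsle3 : s ≤ pvPar ((pos - 1) / 2) := pvInSub_le _ _ hsub3
        have hpplt : pvPar ((pos - 1) / 2) < (pos - 1) / 2 := pvPar_lt _ hp0
        have hedge1 : l.getD (pvPar ((pos - 1) / 2)) 0 ≤ l.getD ((pos - 1) / 2) 0 :=
          hA ((pos - 1) / 2) hp0 (by omega) hsle3 (by omega) (by omega)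
        rw [pv_getD_set_ne _ _ _ _ (by omega : pos ≠ pvPar ((pos - 1) / 2))]
        by_cases hce : c = pos
        · subst hce; rw [pv_getD_set_self _ _ _ hpos]; exact hedge1
        · rw [pv_getD_set_ne _ _ _ _ (fun he => hce he.symm)]
          have hsppos : s ≤ (pos - 1) / 2 := by
            have := pvInSub_le s _ hsub2; omega
          have hedge2 := hA c hc0 hclen (by rw [hcp]; exact hsppos) hce (by rw [hcp]; omega)
          rw [hcp] at hedge2
          exact le_trans hedge1 hedge2
    · -- stop: newitem is not smaller than the parent
      intro c hc0 hclen hspar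
      rw [List.length_set] at hclen
      by_cases hce : c = pos
      · subst hce
        have hplt := pvPar_lt c hc0
        rw [pv_getD_set_ne _ _ _ _ (by omega : c ≠ pvPar c), pv_getD_set_self _ _ _ hpos]
        simp only [pvPar]
        omega
      · by_cases hcp : pvPar c = pos
        · rw [hcp, pv_getD_set_self _ _ _ hpos, pv_getD_set_ne _ _ _ _ (fun he => hce he.symm)]
          exact hB c hc0 hclen hcp
        · rw [pv_getD_set_ne _ _ _ _ (fun he => hcp he.symm),
            pv_getD_set_ne _ _ _ _ (fun he => hce he.symm)]
          exact hA c hc0 hclen hspar hce hcp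
    · -- stop: the hole reached s
      intro c hc0 hclen hspar
      rw [List.length_set] at hclen
      by_cases hce : c = pos
      · subst hce
        exfalso
        have hplt := pvPar_lt c hc0
        have hsle := pvInSub_le s c hsub
        omega
      · by_cases hcp : pvPar c = pos
        · rw [hcp, pv_getD_set_self _ _ _ hpos, pv_getD_set_ne _ _ _ _ (fun he => hce he.symm)]
          exact hB c hc0 hclen hcp
        · rw [pv_getD_set_ne _ _ _ _ (fun he => hcp he.symm),
            pv_getD_set_ne _ _ _ _ (fun he => hce he.symm)]
          exact hA c hc0 hclen hspar hce hcp

-- the heap invariant through the trailing _siftdown of _siftup (hole at a leaf)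
theorem pvSiftupBase_heap (l : List Int) (s pos : Nat) (newitem : Int) (endpos : Nat)
    (hend : endpos = l.length) (hleaf : ¬ 2 * pos + 1 < endpos)
    (hpos : pos < l.length) (hsub : pvInSub s pos = true)
    (hA : ∀ c, 0 < c → c < l.length → s ≤ pvPar c → c ≠ pos → pvPar c ≠ pos →
      l.getD (pvPar c) 0 ≤ l.getD c 0) :
    pvHeapAbove (pvSiftdown (l.set pos newitem) s pos) s := by
  unfold pvSiftdown
  apply pvSiftdownGo_heapAbove _ _ _ _ _ (by omega : pos < pos + 1)
  · simpa using hpos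
  · exact hsub
  · intro c hc0 hclen hspar hcne hcparne
    rw [List.length_set] at hclen
    rw [pv_getD_set_ne _ _ _ _ (fun he => hcparne he.symm),
      pv_getD_set_ne _ _ _ _ (fun he => hcne he.symm)]
    exact hA c hc0 hclen hspar hcne hcparne
  · intro c hc0 hclen hcp
    exfalso
    have := pvPar_child c pos hcp hc0
    rw [List.length_set] at hclen
    omega
  · intro c hc0 hclen hcp _
    exfalso
    have := pvPar_child c pos hcp hc0
    rw [List.length_set] at hclen
    omega

-- the heap invariant through _siftup
theorem pvSiftupGo_heapAbove (s : Nat) (newitem : Int) (endpos : Nat) :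
    ∀ (fuel : Nat) (l : List Int) (pos : Nat), endpos - pos < fuel → endpos = l.length →
      pos < l.length → pvInSub s pos = true →
      (∀ c, 0 < c → c < l.length → s ≤ pvPar c → c ≠ pos → pvPar c ≠ pos →
        l.getD (pvPar c) 0 ≤ l.getD c 0) →
      (∀ c, 0 < c → c < l.length → pvPar c = pos → pos ≠ s →
        l.getD (pvPar pos) 0 ≤ l.getD c 0) →
      pvHeapAbove (pvSiftupGo fuel l endpos s newitem pos) s := by
  intro fuel
  induction fuel with
  | zero => intro l pos hf; exact absurd hf (Nat.not_lt_zero _)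
  | succ n ih =>
    intro l pos hf hend hpos hsub hA hB
    simp only [pvSiftupGo]
    have hs_le_pos : s ≤ pos := pvInSub_le _ _ hsub
    have main : ∀ k : Nat, pvPar k = pos → pos < k → k < endpos →
          (∀ c, 0 < c → c < l.length → pvPar c = pos → l.getD k 0 ≤ l.getD c 0) →
          pvHeapAbove (pvSiftupGo n (l.set pos (l.getD k 0)) endpos s newitem k) s := by
        intro k hk1 hk2 hk3 hkmin
        have hklen : k < l.length := by omega
        apply ih
        · omega
        · simpa using hend
        · simp only [List.length_set]; omega
        · exact pvInSub_child s pos k hsub hk1 (by omega)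
        · -- hA'
          intro c hc0 hclen hspar hcne hcparne
          rw [List.length_set] at hclen
          by_cases hcpos : c = pos
          · subst hcpos
            have hppc : pvPar c < c := pvPar_lt c hc0
            rw [pv_getD_set_ne _ _ _ _ (by omega : c ≠ pvPar c),
              pv_getD_set_self _ _ _ hpos]
            exact hB k (by omega) hklen hk1 (by omega)
          · by_cases hcp : pvPar c = pos
            · rw [hcp, pv_getD_set_self _ _ _ hpos,
                pv_getD_set_ne _ _ _ _ (fun he => hcpos he.symm)]
              exact hkmin c hc0 hclen hcp
            · rw [pv_getD_set_ne _ _ _ _ (fun he => hcp he.symm),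
                pv_getD_set_ne _ _ _ _ (fun he => hcpos he.symm)]
              exact hA c hc0 hclen hspar hcpos hcp
        · -- hB'
          intro c hc0 hclen hcp _
          rw [List.length_set] at hclen
          have hck := pvPar_child c k hcp hc0
          rw [hk1, pv_getD_set_self _ _ _ hpos,
            pv_getD_set_ne _ _ _ _ (by omega : pos ≠ c)]
          have := hA c hc0 hclen (by rw [hcp]; omega) (by omega) (by rw [hcp]; omega)
          rwa [hcp] at this
    have hno : 2 * pos + 1 + 1 = 2 * pos + 2 := by omega
    split_ifs with hg hc
    · -- right child chosen
      rw [hno] at hc ⊢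
      apply main (2 * pos + 2) (by simp only [pvPar]; omega) (by omega) hc.1
      intro c hc0 hclen hcp
      rcases pvPar_child c pos hcp hc0 with rfl | rfl
      · have := hc.2
        omega
      · exact le_refl _
    · -- left child chosen
      rw [hno] at hc
      apply main (2 * pos + 1) (by simp only [pvPar]; omega) (by omega) hg
      intro c hc0 hclen hcp
      rcases pvPar_child c pos hcp hc0 with rfl | rfl
      · exact le_refl _
      · have h1 : 2 * pos + 2 < endpos := by omega
        rcases lt_or_ge (l.getD (2 * pos + 1) 0) (l.getD (2 * pos + 2) 0) with hlt | hge
        · exact le_of_lt hlt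
        · exact absurd ⟨h1, not_lt.mpr hge⟩ hc
    · exact pvSiftupBase_heap l s pos newitem endpos hend hg hpos hsub hA

-- a heap's root is minimal
theorem pvRootMin (l : List Int) (hh : pvIsHeap l) :
    ∀ c, c < l.length → l.getD 0 0 ≤ l.getD c 0 := by
  intro c
  induction c using Nat.strong_induction_on with
  | _ c IH =>
    intro hc
    rcases Nat.eq_zero_or_pos c with rfl | hc0
    · exact le_refl _
    · have hpar := hh c hc0 hc (Nat.zero_le _)
      have hlt : pvPar c < c := pvPar_lt c hc0
      exact le_trans (IH (pvPar c) hlt (by omega)) hpar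

-- heapify
theorem pvHeapify_aux_perm (idxs : List Nat) :
    ∀ (l : List Int), (∀ i ∈ idxs, i < l.length) →
      (idxs.foldl (fun h i => pvSiftup h i) l).Perm l := by
  induction idxs with
  | nil => intro l _; simp
  | cons a t ih =>
    intro l hlt
    simp only [List.foldl_cons]
    have h1 : (pvSiftup l a).Perm l := pvSiftup_perm l a (hlt a (by simp))
    refine (ih (pvSiftup l a) ?_).trans h1
    intro i hi
    rw [pvSiftup_length]
    exact hlt i (by simp [hi])

theorem pvHeapify_perm (l : List Int) : (pvHeapify l).Perm l := by
  unfold pvHeapify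
  apply pvHeapify_aux_perm
  intro i hi
  simp only [List.mem_reverse, List.mem_range] at hi
  omega

theorem pvHeapify_aux_heap :
    ∀ (i : Nat) (l : List Int), i ≤ l.length → pvHeapAbove l i →
      pvHeapAbove (((List.range i).reverse).foldl (fun h j => pvSiftup h j) l) 0 := by
  intro i
  induction i with
  | zero => intro l _ h; simpa using h
  | succ i ih =>
    intro l hle hha
    have e : (List.range (i + 1)).reverse = i :: (List.range i).reverse := by
      rw [List.range_succ]; simp
    rw [e, List.foldl_cons]
    have hpos : i < l.length := by omega
    have hstep : pvHeapAbove (pvSiftup l i) i := by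
      unfold pvSiftup
      apply pvSiftupGo_heapAbove i (l.getD i 0) l.length (l.length + 1) l i (by omega) rfl hpos
        (pvInSub_self i)
      · intro c hc0 hclen hspar hcne hcparne
        exact hha c hc0 hclen (by omega)
      · intro c _ _ _ hne
        exact absurd rfl hne
    apply ih (pvSiftup l i)
    · rw [pvSiftup_length]; omega
    · exact hstep

theorem pvHeapify_isHeap (l : List Int) : pvIsHeap (pvHeapify l) := by
  unfold pvHeapify pvIsHeap
  apply pvHeapify_aux_heap (l.length / 2) l (by omega)
  intro c hc0 hclen hpar
  exfalso
  simp only [pvPar] at hpar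
  omega

-- heappush
theorem pvHeappush_spec (l : List Int) (x : Int) (hh : pvIsHeap l) :
    pvIsHeap (pvHeappush l x) ∧ (pvHeappush l x).Perm (x :: l) := by
  constructor
  · unfold pvHeappush pvSiftdown pvIsHeap
    apply pvSiftdownGo_heapAbove _ _ _ _ _ (by omega : l.length < l.length + 1)
    · simp
    · exact pvInSub_zero l.length
    · intro c hc0 hclen hspar hcne hcparne
      simp only [List.length_append, List.length_cons, List.length_nil] at hclen
      have hclt : c < l.length := by omega
      have hplt : pvPar c < l.length := by have := pvPar_lt c hc0; omega
      rw [List.getD_append _ _ _ _ hplt, List.getD_append _ _ _ _ hclt]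
      exact hh c hc0 hclt (Nat.zero_le _)
    · intro c hc0 hclen hcp
      exfalso
      have := pvPar_child c l.length hcp hc0
      simp only [List.length_append, List.length_cons, List.length_nil] at hclen
      omega
    · intro c hc0 hclen hcp _
      exfalso
      have := pvPar_child c l.length hcp hc0
      simp only [List.length_append, List.length_cons, List.length_nil] at hclen
      omega
  · unfold pvHeappush pvSiftdown
    have e1 : (l ++ [x]).getD l.length 0 = x := by
      rw [List.getD_append_right _ _ _ _ le_rfl]; simp
    have e2 : (l ++ [x]).set l.length x = l ++ [x] := by
      have := pv_set_getD_self (l ++ [x]) l.length (by simp)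
      rwa [e1] at this
    rw [e1]
    have h1 := pvSiftdownGo_perm x 0 (l.length + 1) l.length (l ++ [x]) (by omega) (by simp)
    rw [e2] at h1
    exact h1.trans (List.perm_append_singleton x l)

-- heappop
theorem pvHeappop_spec (l : List Int) (hne : l ≠ []) (hh : pvIsHeap l) :
    ∃ r, pvHeappop l = some (l.getD 0 0, r) ∧ pvIsHeap r ∧ l.Perm (l.getD 0 0 :: r) := by
  have hlp : 0 < l.length := List.length_pos_iff.mpr hne
  have hgl : l.getLast? = some (l.getLast hne) := List.getLast?_eq_some_getLast hne
  by_cases hre : l.dropLast.isEmpty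
  · have hdrop : l.dropLast = [] := List.isEmpty_iff.mp hre
    have hlen1 : l.length = 1 := by
      have h0 := List.length_dropLast (xs := l)
      rw [hdrop] at h0; simp at h0; omega
    obtain ⟨a, rfl⟩ := List.length_eq_one_iff.mp hlen1
    refine ⟨[], by simp [pvHeappop], ?_, by simp⟩
    intro c hc0 hclen hsp
    simp at hclen
  · have hdne : l.dropLast ≠ [] := fun he => hre (by simp [he])
    have hrlen : 0 < l.dropLast.length := List.length_pos_iff.mpr hdne
    have hllen2 : 2 ≤ l.length := by rw [List.length_dropLast] at hrlen; omega
    have hget0 : l.dropLast.getD 0 0 = l.getD 0 0 := by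
      rw [List.getD_eq_getElem _ _ hrlen, List.getD_eq_getElem _ _ hlp]
      exact List.getElem_dropLast hrlen
    refine ⟨pvSiftup (l.dropLast.set 0 (l.getLast hne)) 0, ?_, ?_, ?_⟩
    · unfold pvHeappop
      rw [hgl]
      dsimp only
      rw [if_neg (by simpa using hre), hget0]
    · unfold pvSiftup pvIsHeap
      have hl0len : (l.dropLast.set 0 (l.getLast hne)).length = l.dropLast.length := by simp
      apply pvSiftupGo_heapAbove 0 _ (l.dropLast.set 0 (l.getLast hne)).length
        ((l.dropLast.set 0 (l.getLast hne)).length + 1)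
        (l.dropLast.set 0 (l.getLast hne)) 0 (by omega) rfl (by omega) (pvInSub_self 0)
      · intro c hc0 hclen hspar hcne hcparne
        rw [hl0len] at hclen
        rw [pv_getD_set_ne _ _ _ _ (fun he => hcparne he.symm),
          pv_getD_set_ne _ _ _ _ (fun he => hcne he.symm)]
        have hpc : pvPar c < l.dropLast.length := by have := pvPar_lt c hc0; omega
        have g1 : l.dropLast.getD c 0 = l.getD c 0 := by
          rw [List.getD_eq_getElem _ _ hclen,
            List.getD_eq_getElem _ _ (by rw [List.length_dropLast] at hclen; omega)]
          exact List.getElem_dropLast hclen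
        have g2 : l.dropLast.getD (pvPar c) 0 = l.getD (pvPar c) 0 := by
          rw [List.getD_eq_getElem _ _ hpc,
            List.getD_eq_getElem _ _ (by rw [List.length_dropLast] at hpc; omega)]
          exact List.getElem_dropLast hpc
        rw [g1, g2]
        exact hh c hc0 (by rw [List.length_dropLast] at hclen; omega) (Nat.zero_le _)
      · intro c _ _ _ hne0
        exact absurd rfl hne0
    · have h1 : l.Perm (l.getLast hne :: l.dropLast) := by
        conv_lhs => rw [← List.dropLast_append_getLast hne]
        exact List.perm_append_singleton _ _
      have h2 : (pvSiftup (l.dropLast.set 0 (l.getLast hne)) 0).Perm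
          (l.dropLast.set 0 (l.getLast hne)) :=
        pvSiftup_perm _ 0 (by simpa using hrlen)
      have h3 : (l.dropLast.set 0 (l.getLast hne)).Perm
          (l.getLast hne :: l.dropLast.eraseIdx 0) :=
        pv_set_perm _ 0 _ hrlen
      have h4 : l.dropLast.Perm (l.getD 0 0 :: l.dropLast.eraseIdx 0) := by
        have h5 := pv_perm_cons_eraseIdx l.dropLast 0 hrlen
        have h6 : l.dropLast[0]'hrlen = l.getD 0 0 := by
          rw [List.getD_eq_getElem _ _ hlp]; exact List.getElem_dropLast hrlen
        rwa [h6] at h5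
      refine h1.trans ?_
      refine ((h4.cons _).trans (List.Perm.swap _ _ _)).trans ?_
      exact ((h2.trans h3).symm.cons _)

-- B's min() finds exactly the heap root
theorem pvMinEq (h xs : List Int) (m : Int) (hh : pvIsHeap h) (hperm : h.Perm xs)
    (hne : h ≠ []) (hm : PySem.List.min? xs (fun x => x) = some m) : m = h.getD 0 0 := by
  have hlen : 0 < h.length := List.length_pos_iff.mpr hne
  have hmem : m ∈ h := (hperm.mem_iff).mpr (PySem.List.min?_mem hm)
  have h1 : h.getD 0 0 ≤ m := by
    obtain ⟨i, hi, hieq⟩ := List.mem_iff_getElem.mp hmem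
    have := pvRootMin h hh i hi
    rwa [List.getD_eq_getElem _ _ hi, hieq] at this
  have h0mem : h.getD 0 0 ∈ xs := by
    rw [List.getD_eq_getElem _ _ hlen]
    exact hperm.mem_iff.mp (List.getElem_mem hlen)
  have h2 : m ≤ h.getD 0 0 := by simpa using PySem.List.min?_isMin hm _ h0mem
  omega

-- B's remove() removes one occurrence of the minimum
theorem pvRemoveSome (xs : List Int) (m : Int) (hm : m ∈ xs) :
    ∃ ys, PySem.List.remove? xs m = some ys ∧ xs.Perm (m :: ys) := by
  have h1 : (PySem.List.index? xs m).isSome := (PySem.List.index?_isSome_iff xs m).mpr hm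
  obtain ⟨k, hk⟩ := Option.isSome_iff_exists.mp h1
  obtain ⟨hklt, hkeq, -⟩ := PySem.List.getElem_of_index?_eq_some hk
  refine ⟨xs.eraseIdx k, ?_, ?_⟩
  · rw [PySem.List.index?_eq_idxOf?] at hk
    simp [PySem.List.remove?, hk]
  · have := pv_perm_cons_eraseIdx xs k hklt
    rwa [hkeq] at this

theorem pvSolGo_nil (fuel : Nat) (K ans : Int) : pvSolGo fuel K [] ans = 0 := by
  cases fuel <;> rfl

theorem pvAltGo_nil (fuel : Nat) (K count : Int) : pvAltGo fuel K [] count = 0 := by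
  cases fuel <;> rfl

-- the two loops agree on permutation-equal states when the A-side state is a heap
theorem pvMain (K : Int) :
    ∀ (nA nB : Nat) (h xs : List Int) (ans : Int), h.length < nA → xs.length < nB →
      pvIsHeap h → h.Perm xs → pvSolGo nA K h ans = pvAltGo nB K xs ans := by
  intro nA
  induction nA with
  | zero => intro nB h xs ans hlen; exact absurd hlen (Nat.not_lt_zero _)
  | succ n ih =>
    intro nB h xs ans hlen hlenB hh hperm
    cases nB with
    | zero => exact absurd hlenB (Nat.not_lt_zero _)
    | succ nB =>
    by_cases hne : h = []
    · subst hne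
      have hx : xs = [] := List.perm_nil.mp hperm.symm
      subst hx
      rw [pvSolGo_nil, pvAltGo_nil]
    · have hxne : xs ≠ [] := by
        intro hx; subst hx
        exact hne (List.perm_nil.mp hperm)
      obtain ⟨r, hpop, hhr, hpr⟩ := pvHeappop_spec h hne hh
      cases hmin : PySem.List.min? xs (fun x => x) with
      | none => exact absurd ((PySem.List.min?_eq_none_iff _ _).mp hmin) hxne
      | some m =>
        have hm0 : m = h.getD 0 0 := pvMinEq h xs m hh hperm hne hmin
        rw [← hm0] at hpop hpr
        simp only [pvSolGo, pvAltGo, hpop, hmin]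
        by_cases hK : m ≥ K
        · rw [if_pos hK, if_pos hK]
        · rw [if_neg hK, if_neg hK]
          obtain ⟨ys, hrem, hpxy⟩ := pvRemoveSome xs m (PySem.List.min?_mem hmin)
          have hry : r.Perm ys := by
            apply List.Perm.cons_inv (a := m)
            exact (hpr.symm.trans hperm).trans hpxy
          have hlry : r.length = ys.length := hry.length_eq
          rw [hrem]
          dsimp only
          by_cases hr0 : r.length = 0
          · rw [if_pos hr0]
            have hys : ys.isEmpty := by
              rw [List.isEmpty_iff]
              exact List.length_eq_zero_iff.mp (by omega)
            rw [if_pos hys]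
          · rw [if_neg hr0]
            have hrne : r ≠ [] := fun he => hr0 (by simp [he])
            have hysne : ys ≠ [] := fun he => hr0 (by rw [hlry, he]; rfl)
            obtain ⟨r2, hpop2, hhr2, hpr2⟩ := pvHeappop_spec r hrne hhr
            cases hmin2 : PySem.List.min? ys (fun x => x) with
            | none => exact absurd ((PySem.List.min?_eq_none_iff _ _).mp hmin2) hysne
            | some m2 =>
              have hm2 : m2 = r.getD 0 0 := pvMinEq r ys m2 hhr hry hrne hmin2
              rw [← hm2] at hpop2 hpr2
              obtain ⟨zs, hrem2, hpyz⟩ := pvRemoveSome ys m2 (PySem.List.min?_mem hmin2)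
              have hrz : r2.Perm zs := by
                apply List.Perm.cons_inv (a := m2)
                exact (hpr2.symm.trans hry).trans hpyz
              rw [if_neg (by simpa [List.isEmpty_iff] using hysne), hpop2]
              dsimp only
              rw [hrem2]
              dsimp only
              obtain ⟨hph, hpp⟩ := pvHeappush_spec r2 (m + 2 * m2) hhr2
              apply ih
              · have l1 := pvHeappop_length h m r hpop
                have l2 := pvHeappop_length r m2 r2 hpop2
                rw [pvHeappush_length]; omega
              · have l1 := pvHeappop_length h m r hpop
                have l3 := pvRemove?_length xs ys m hrem
                have l4 := pvRemove?_length ys zs m2 hrem2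
                simp only [List.length_append, List.length_cons, List.length_nil]
                omega
              · exact hph
              · refine hpp.trans ?_
                refine (hrz.cons _).trans ?_
                exact (List.perm_append_singleton _ _).symm

-- ===== VERDICT (by name: the statement is the Claim_ definition above) =====
theorem solution_spec : Claim_equal_solution := by
  intro scoville K _dom _pre
  unfold Spec_solution solution solution_alt
  apply pvMain
  · rw [(pvHeapify_perm scoville).length_eq]; omega
  · omega
  · exact pvHeapify_isHeap scoville
  · exact pvHeapify_perm scoville
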